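-- pv_equiv track=rewrite | github.com/Hergam/ProjetGraphes | fonctions.py | calcul_marges
-- ===== SOURCE A (Python) =====
-- def calcul_marges(matrice, rangs,d_tot,d_tard):
--
--     # CALCUL DES MARGES TOTALES
--
--     marge_totale = []
--
--     for i in range(len(matrice)):
--         # La marge totale est la différence entre la date au plus tard et la date au plus tôt
--         # Si elle vaut 0, la tâche est critique
--         marge = d_tard[i] - d_tot[i]
--         marge_totale.append(marge)
--
--
--     # CALCUL DES MARGES LIBRES
--
--     marge_libre = []
--
--     for i in range(len(matrice)):
--         successeurs = []
--
--         # On cherche tous les successeurs de la tâche i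
--         for j in range(len(matrice)):
--             # Si la tâche i est un prédécesseur de la tâche j
--             if i in matrice[j][2:]:
--                 successeurs.append(j)
--
--         # Si la tâche a des successeurs
--         if successeurs:
--             # On initialise avec la date au plus tôt du premier successeur
--             min_d_tot_succ = d_tot[successeurs[0]]
--
--             # On cherche le plus petit d_tot parmi les successeurs
--             for j in successeurs:
--                 if d_tot[j] < min_d_tot_succ:
--                     min_d_tot_succ = d_tot[j]
--
--             # La marge libre est la date au plus tôt du plus rapide des successeurs
--             # moins (la date au plus tôt de la tâche + sa durée)
--             marge = min_d_tot_succ - (d_tot[i] + matrice[i][1])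
--         else:
--             # Si la tâche n'a pas de successeurs, sa marge libre = marge totale
--             marge = marge_totale[i]
--
--         marge_libre.append(marge)
--
--     # On retourne les deux listes de marges
--     return marge_totale, marge_libre
-- ===== SOURCE B (Python) =====
-- def calcul_marges(matrice, rangs, d_tot, d_tard):
--     n = len(matrice)
--
--     # Total slack: late date minus early date, one comprehension.
--     marge_totale = [d_tard[i] - d_tot[i] for i in range(n)]
--
--     # One pass over the rows: for every predecessor p listed in row j,
--     # keep the minimum early date d_tot[j] among j's that have p as predecessor.
--     succ_min = {}
--     for j in range(n):
--         dj = d_tot[j]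
--         for p in matrice[j][2:]:
--             if p not in succ_min or dj < succ_min[p]:
--                 succ_min[p] = dj
--
--     # Free slack: min early date of successors minus (early date + duration),
--     # or the total slack when the task has no successor.
--     marge_libre = [succ_min[i] - (d_tot[i] + matrice[i][1]) if i in succ_min
--                    else marge_totale[i]
--                    for i in range(n)]
--
--     return marge_totale, marge_libre
-- ===== Notes on version B (the rewrite author's own statement) =====
-- stated objective: faster
-- what changed: Instead of scanning all n rows for each task to collect its successors (and then a third scan for the minimum), B builds in one pass over the rows a predecessor->minimal-successor-early-date map, then reads each task's free slack off that map.
import Mathlib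
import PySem

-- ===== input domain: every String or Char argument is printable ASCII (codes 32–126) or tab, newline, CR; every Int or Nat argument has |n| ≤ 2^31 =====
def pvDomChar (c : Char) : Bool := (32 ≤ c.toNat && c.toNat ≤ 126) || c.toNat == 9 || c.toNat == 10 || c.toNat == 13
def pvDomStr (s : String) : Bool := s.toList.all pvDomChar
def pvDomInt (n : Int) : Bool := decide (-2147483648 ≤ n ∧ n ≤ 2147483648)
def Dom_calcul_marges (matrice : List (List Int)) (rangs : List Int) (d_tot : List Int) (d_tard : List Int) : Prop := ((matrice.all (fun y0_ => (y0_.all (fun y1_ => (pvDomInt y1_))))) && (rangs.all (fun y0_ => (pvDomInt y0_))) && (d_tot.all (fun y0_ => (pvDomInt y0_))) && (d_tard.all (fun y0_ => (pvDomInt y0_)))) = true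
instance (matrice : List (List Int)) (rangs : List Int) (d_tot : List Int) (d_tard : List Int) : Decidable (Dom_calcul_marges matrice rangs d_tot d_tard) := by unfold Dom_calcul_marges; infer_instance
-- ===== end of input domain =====

-- B builds a predecessor -> minimal-successor-early-date map in one pass over the rows
-- instead of A's per-task scan of all rows; same return value on all of Pre_.

-- ===== PORT A =====
def calcul_marges (matrice : List (List Int)) (rangs : List Int) (d_tot : List Int) (d_tard : List Int) : List Int × List Int :=
  let n := matrice.length
  let marge_totale : List Int := (List.range n).foldl (fun acc i =>
    acc ++ [PySem.List.pyGetD d_tard (i : Int) 0 - PySem.List.pyGetD d_tot (i : Int) 0]) []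
  let marge_libre : List Int := (List.range n).foldl (fun acc i =>
    let successeurs : List Int := (List.range n).foldl (fun (s : List Int) (j : Nat) =>
      if (i : Int) ∈ (PySem.List.pyGetD matrice (j : Int) []).drop 2 then s ++ [(j : Int)] else s) ([] : List Int)
    let marge : Int :=
      match successeurs with
      | [] => PySem.List.pyGetD marge_totale (i : Int) 0
      | j0 :: _ =>
        let m0 := PySem.List.pyGetD d_tot j0 0
        let mn := successeurs.foldl (fun m j =>
          if PySem.List.pyGetD d_tot j 0 < m then PySem.List.pyGetD d_tot j 0 else m) m0
        mn - (PySem.List.pyGetD d_tot (i : Int) 0 + PySem.List.pyGetD (PySem.List.pyGetD matrice (i : Int) []) 1 0)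
    acc ++ [marge]) []
  (marge_totale, marge_libre)

-- ===== PORT B =====
def calcul_marges_alt (matrice : List (List Int)) (rangs : List Int) (d_tot : List Int) (d_tard : List Int) : List Int × List Int :=
  let n := matrice.length
  let marge_totale : List Int := (List.range n).map (fun i =>
    PySem.List.pyGetD d_tard (i : Int) 0 - PySem.List.pyGetD d_tot (i : Int) 0)
  let succ_min : PySem.Dict Int Int := (List.range n).foldl (fun d j =>
    let dj := PySem.List.pyGetD d_tot (j : Int) 0
    ((PySem.List.pyGetD matrice (j : Int) []).drop 2).foldl (fun d p =>
      match d.get? p with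
      | none => d.insert p dj
      | some m => if dj < m then d.insert p dj else d) d) PySem.Dict.empty
  let marge_libre : List Int := (List.range n).map (fun i =>
    match succ_min.get? (i : Int) with
    | some m => m - (PySem.List.pyGetD d_tot (i : Int) 0 + PySem.List.pyGetD (PySem.List.pyGetD matrice (i : Int) []) 1 0)
    | none => PySem.List.pyGetD marge_totale (i : Int) 0)
  (marge_totale, marge_libre)

-- ===== PRECONDITION & SPEC =====
-- Pre_ excludes exactly the inputs where Python A raises IndexError: d_tot/d_tard shorter
-- than matrice, or a task that has a successor but whose row has no duration entry [1].
def Pre_calcul_marges (matrice : List (List Int)) (rangs : List Int) (d_tot : List Int) (d_tard : List Int) : Prop :=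
  matrice.length ≤ d_tot.length ∧ matrice.length ≤ d_tard.length ∧
  ∀ i < matrice.length, (∃ j < matrice.length, (i : Int) ∈ (matrice.getD j []).drop 2) →
    2 ≤ (matrice.getD i []).length
instance (matrice : List (List Int)) (rangs : List Int) (d_tot : List Int) (d_tard : List Int) : Decidable (Pre_calcul_marges matrice rangs d_tot d_tard) := by unfold Pre_calcul_marges; infer_instance
def pvWitness_calcul_marges : List (List Int) × List Int × List Int × List Int :=
  ([[1, 2], [1, 3, 0]], [], [0, 2], [1, 3])
def Spec_calcul_marges (matrice : List (List Int)) (rangs : List Int) (d_tot : List Int) (d_tard : List Int) (out : List Int × List Int) : Prop := out = calcul_marges_alt matrice rangs d_tot d_tard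
instance (matrice : List (List Int)) (rangs : List Int) (d_tot : List Int) (d_tard : List Int) (out : List Int × List Int) : Decidable (Spec_calcul_marges matrice rangs d_tot d_tard out) := by unfold Spec_calcul_marges; infer_instance

-- ===== CLAIM (what is proved, stated in full; the proofs are below) =====
def Claim_equal_calcul_marges : Prop := ∀ (matrice : List (List Int)) (rangs : List Int) (d_tot : List Int) (d_tard : List Int), Dom_calcul_marges matrice rangs d_tot d_tard → Pre_calcul_marges matrice rangs d_tot d_tard → Spec_calcul_marges matrice rangs d_tot d_tard (calcul_marges matrice rangs d_tot d_tard)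

-- ===== LEMMAS AND PROOFS =====

-- "new minimum" combiner: what one update of the dict at a present/absent key does to its value
def optMin (o : Option Int) (v : Int) : Int :=
  match o with
  | none => v
  | some m => if v < m then v else m

theorem optMin_idem (o : Option Int) (v : Int) :
    optMin (some (optMin o v)) v = optMin o v := by
  cases o with
  | none => simp [optMin]
  | some m => simp only [optMin]; split_ifs <;> omega

-- one row of B's pass: effect on the value stored at key x
theorem inner_get (row : List Int) (dj : Int) (d : PySem.Dict Int Int) (x : Int) :
    ((row.foldl (fun d p =>
        match d.get? p with
        | none => d.insert p dj
        | some m => if dj < m then d.insert p dj else d) d).get? x) =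
      if x ∈ row then some (optMin (d.get? x) dj) else d.get? x := by
  induction row generalizing d with
  | nil => simp
  | cons p rest ih =>
    simp only [List.foldl_cons, List.mem_cons]
    by_cases hpx : x = p
    · subst hpx
      have hstep : ((match d.get? x with
          | none => d.insert x dj
          | some m => if dj < m then d.insert x dj else d) : PySem.Dict Int Int).get? x
          = some (optMin (d.get? x) dj) := by
        cases ho : d.get? x with
        | none => simp [optMin, PySem.Dict.get?_insert_self]
        | some m =>
          simp only [optMin]
          by_cases hlt : dj < m
          · simp [hlt, PySem.Dict.get?_insert_self]
          · simp [hlt, ho]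
      rw [ih, hstep]
      by_cases hr : x ∈ rest <;> simp [hr, optMin_idem]
    · have hstep : ((match d.get? p with
          | none => d.insert p dj
          | some m => if dj < m then d.insert p dj else d) : PySem.Dict Int Int).get? x
          = d.get? x := by
        cases ho : d.get? p with
        | none => simp [PySem.Dict.get?_insert_of_ne _ _ hpx]
        | some m =>
          split <;> first
            | rfl
            | simp [PySem.Dict.get?_insert_of_ne _ _ hpx]
            | (split <;> first
                | rfl
                | simp [PySem.Dict.get?_insert_of_ne _ _ hpx])
      rw [ih, hstep]
      simp [hpx]

-- B's whole pass, read at key x, as an Option-fold over the row indices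
theorem outer_get {ι : Type} (P : ι → List Int) (v : ι → Int) (x : Int) (js : List ι)
    (d : PySem.Dict Int Int) :
    ((js.foldl (fun d j =>
        (P j).foldl (fun d p =>
          match d.get? p with
          | none => d.insert p (v j)
          | some m => if v j < m then d.insert p (v j) else d) d) d).get? x) =
      js.foldl (fun o j => if x ∈ P j then some (optMin o (v j)) else o) (d.get? x) := by
  induction js generalizing d with
  | nil => rfl
  | cons j rest ih =>
    simp only [List.foldl_cons]
    rw [ih, inner_get]

-- the Option-fold over a list whose filtered part starts at some m
theorem optFold_some {ι : Type} (P : ι → List Int) (v : ι → Int) (x : Int) (js : List ι) (m : Int) :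
    js.foldl (fun o j => if x ∈ P j then some (optMin o (v j)) else o) (some m) =
      some ((js.filter (fun j => decide (x ∈ P j))).foldl
        (fun m j => if v j < m then v j else m) m) := by
  induction js generalizing m with
  | nil => simp
  | cons j rest ih =>
    by_cases h : x ∈ P j
    · rw [List.foldl_cons, if_pos h, ih]
      simp [h, optMin]
    · simp [h, ih]

-- the Option-fold from none versus A's filter + explicit min scan
theorem optFold_none {ι : Type} (P : ι → List Int) (v : ι → Int) (x : Int) (js : List ι) :
    js.foldl (fun o j => if x ∈ P j then some (optMin o (v j)) else o) none =
      match js.filter (fun j => decide (x ∈ P j)) with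
      | [] => none
      | j0 :: rest => some (rest.foldl (fun m j => if v j < m then v j else m) (v j0)) := by
  induction js with
  | nil => rfl
  | cons j rest ih =>
    by_cases h : x ∈ P j
    · rw [List.foldl_cons, if_pos h, optFold_some]
      simp [h, optMin]
    · simpa [h] using ih

-- A's min scan starting at the head revisits the head harmlessly
-- A's per-task successor collection: append-if loop with a cast, as filter-then-map
theorem foldl_append_ite_map {α β : Type} (p : α → Prop) [DecidablePred p] (f : α → β)
    (l : List α) (acc : List β) :
    l.foldl (fun acc x => if p x then acc ++ [f x] else acc) acc =
      acc ++ (l.filter (fun x => decide (p x))).map f := by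
  induction l generalizing acc with
  | nil => simp
  | cons x rest ih =>
    by_cases h : p x <;> simp [h, ih]

-- ===== VERDICT (by name: the statement is the Claim_ definition above) =====
theorem calcul_marges_spec : Claim_equal_calcul_marges := by
  intro matrice rangs d_tot d_tard _hDom _hPre
  unfold Spec_calcul_marges calcul_marges calcul_marges_alt
  simp only [PySem.List.foldl_append_singleton_eq_map, List.nil_append, Prod.mk.injEq]
  refine ⟨trivial, ?_⟩
  apply List.map_congr_left
  intro i _hi
  rw [foldl_append_ite_map (fun j : Nat => (i : Int) ∈ (PySem.List.pyGetD matrice (j : Int) []).drop 2)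
        (fun j : Nat => (j : Int)), List.nil_append,
      outer_get (fun j : Int => (PySem.List.pyGetD matrice j []).drop 2)
        (fun j : Int => PySem.List.pyGetD d_tot j 0) i,
      PySem.Dict.get?_empty, optFold_none]
  simp only [bind_pure_comp, List.map_eq_map, List.filter_map, Function.comp_def]
  generalize List.filter (fun (x : Nat) => decide ((i : Int) ∈ (PySem.List.pyGetD matrice (x : Int) []).drop 2)) (List.range matrice.length) = fl
  cases fl with
  | nil => rfl
  | cons j0 rest => simp
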